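-- pv_equiv track=rewrite | github.com/jiajunma/proveagent | code/res2md.py | _convert_inline_bold
-- ===== SOURCE A (Python) =====
-- def _convert_inline_bold(text: str) -> str:
--     """Convert **bold** to \textbf{bold}, avoiding math mode."""
--     # Match **...** but not inside $...$
--     parts = []
--     remaining = text
--     while True:
--         # Find next ** that is not inside $
--         dollar_count = 0
--         idx = 0
--         while idx < len(remaining):
--             if remaining[idx] == "$" and (idx == 0 or remaining[idx - 1] != "\\"):
--                 dollar_count = 1 - dollar_count
--                 idx += 1
--                 continue
--             if dollar_count == 0 and remaining[idx : idx + 2] == "**":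
--                 break
--             idx += 1
--         if idx >= len(remaining):
--             parts.append(remaining)
--             break
--         # Found ** at idx
--         parts.append(remaining[:idx])
--         start = idx + 2
--         # Find closing **
--         end = remaining.find("**", start)
--         if end == -1:
--             parts.append(remaining[idx:])
--             break
--         inner = remaining[start:end]
--         parts.append(r"\textbf{" + inner + "}")
--         remaining = remaining[end + 2 :]
--     return "".join(parts)
-- ===== SOURCE B (Python) =====
-- def _convert_inline_bold(text: str) -> str:
--     """Convert **bold** to \textbf{bold}, avoiding math mode."""
--     # Single forward pass with an integer cursor: no slicing of the
--     # remainder and no rescanning after each replacement.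
--     out = []
--     n = len(text)
--     i = 0       # cursor
--     seg = 0     # start of pending literal segment
--     dollar = False
--     while i < n:
--         c = text[i]
--         if c == "$" and (i == 0 or text[i - 1] != "\\"):
--             dollar = not dollar
--             i += 1
--             continue
--         if (not dollar) and c == "*" and i + 1 < n and text[i + 1] == "*":
--             end = text.find("**", i + 2)
--             if end == -1:
--                 break
--             out.append(text[seg:i])
--             out.append("\\textbf{" + text[i + 2 : end] + "}")
--             i = end + 2
--             seg = i
--             dollar = False
--             continue
--         i += 1
--     out.append(text[seg:])
--     return "".join(out)
-- ===== Notes on version B (the rewrite author's own statement) =====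
-- stated objective: faster
-- what changed: Replaces A's outer loop that re-slices the remaining string and restarts an index scan after every replacement by one forward pass over the original string with an integer cursor, a pending-segment start and an incrementally tracked dollar state.
import Mathlib
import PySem

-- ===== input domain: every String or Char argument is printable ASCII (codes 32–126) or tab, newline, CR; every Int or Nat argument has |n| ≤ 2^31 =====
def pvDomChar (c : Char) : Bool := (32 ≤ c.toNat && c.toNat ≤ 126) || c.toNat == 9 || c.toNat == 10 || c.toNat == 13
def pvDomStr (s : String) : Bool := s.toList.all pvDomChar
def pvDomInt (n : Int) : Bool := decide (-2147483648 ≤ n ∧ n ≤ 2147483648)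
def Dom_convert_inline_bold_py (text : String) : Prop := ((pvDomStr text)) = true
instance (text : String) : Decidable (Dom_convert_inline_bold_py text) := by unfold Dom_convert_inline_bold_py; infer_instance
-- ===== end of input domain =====

-- B replaces A's repeated slice-and-rescan outer loop by a single forward pass with an
-- integer cursor and a pending-segment start; same output, no slicing of the remainder.


-- ===== PORT A =====
-- A's inner `while idx < len(remaining)` scan: walks the list threading `pe` = "idx > 0 and
-- remaining[idx-1] == '\\'" and the dollar parity `dc`; returns the break index `idx`
-- (= remaining's length when the loop runs off the end).  `remaining[idx:idx+2] == "**"`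
-- ⇔ current char is '*' and the next char exists and is '*' (a 1-char slice never equals "**").
def scanA : List Char → Bool → Bool → Nat
  | [], _, _ => 0
  | c :: rest, pe, dc =>
    if c = '$' ∧ pe = false then scanA rest (decide (c = '\\')) (!dc) + 1
    else if dc = false ∧ c = '*' ∧ rest.head? = some '*' then 0
    else scanA rest (decide (c = '\\')) dc + 1

-- A's outer `while True` loop over `remaining`; `remaining.find("**", start)` is ported as
-- PySem.Chars.find on the dropped suffix (result relative to `start`; slice bounds adjusted
-- accordingly — exactly PySem.Chars.findFrom_natCast's reading of str.find with a start).
def convA (remaining : List Char) : List Char :=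
  let idx := scanA remaining false false
  if _h : idx ≥ remaining.length then remaining
  else
    let start := idx + 2
    let e := PySem.Chars.find (remaining.drop start) "**".toList
    if e = -1 then remaining.take idx ++ remaining.drop idx
    else
      let e0 := e.toNat
      remaining.take idx ++ "\\textbf{".toList ++ (remaining.drop start).take e0 ++ ['}']
        ++ convA (remaining.drop (start + e0 + 2))
termination_by remaining.length
decreasing_by simp only [List.length_drop]; omega

def convert_inline_bold_py (text : String) : String := String.ofList (convA text.toList)

-- ===== PORT B =====
-- B's single `while i < n` loop: cursor `i`, pending literal segment starting at `seg`,
-- dollar parity; `text.find("**", i+2)` ported relative to `i+2` as in port A.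
def convB (t : List Char) (i seg : Nat) (dollar : Bool) (acc : List Char) : List Char :=
  if _h : i < t.length then
    if t.getD i ' ' = '$' ∧ (i = 0 ∨ ¬ t.getD (i - 1) ' ' = '\\') then
      convB t (i + 1) seg (!dollar) acc
    else if dollar = false ∧ t.getD i ' ' = '*' ∧ i + 1 < t.length ∧ t.getD (i + 1) ' ' = '*' then
      -- end := text.find("**", i+2), ported relative to i+2 (see port A's comment)
      if PySem.Chars.find (t.drop (i + 2)) "**".toList = -1 then acc ++ t.drop seg
      else
        convB t (i + 2 + (PySem.Chars.find (t.drop (i + 2)) "**".toList).toNat + 2)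
              (i + 2 + (PySem.Chars.find (t.drop (i + 2)) "**".toList).toNat + 2) false
          (acc ++ (t.drop seg).take (i - seg) ++ "\\textbf{".toList
             ++ (t.drop (i + 2)).take (PySem.Chars.find (t.drop (i + 2)) "**".toList).toNat ++ ['}'])
    else convB t (i + 1) seg dollar acc
  else acc ++ t.drop seg
termination_by t.length - i
decreasing_by all_goals omega

def convert_inline_bold_py_alt (text : String) : String :=
  String.ofList (convB text.toList 0 0 false [])

-- ===== PRECONDITION & SPEC =====
def Spec_convert_inline_bold_py (text : String) (out : String) : Prop := out = convert_inline_bold_py_alt text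
instance (text : String) (out : String) : Decidable (Spec_convert_inline_bold_py text out) := by unfold Spec_convert_inline_bold_py; infer_instance

-- ===== CLAIM (what is proved, stated in full; the proofs are below) =====
def Claim_equal_convert_inline_bold_py : Prop := ∀ (text : String), Dom_convert_inline_bold_py text → Spec_convert_inline_bold_py text (convert_inline_bold_py text)

-- ===== LEMMAS AND PROOFS =====

-- convA with the inner scan started in an arbitrary state (proof-side generalisation).
def convA' (remaining : List Char) (pe dc : Bool) : List Char :=
  let idx := scanA remaining pe dc
  if idx ≥ remaining.length then remaining
  else
    let start := idx + 2
    let e := PySem.Chars.find (remaining.drop start) "**".toList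
    if e = -1 then remaining.take idx ++ remaining.drop idx
    else
      let e0 := e.toNat
      remaining.take idx ++ "\\textbf{".toList ++ (remaining.drop start).take e0 ++ ['}']
        ++ convA (remaining.drop (start + e0 + 2))

lemma convA_eq (remaining : List Char) : convA remaining = convA' remaining false false := by
  rw [convA, convA', dite_eq_ite]

-- "previous char is an escaping backslash" at absolute position i of t
def peB (t : List Char) (i : Nat) : Bool := decide (i ≠ 0 ∧ t.getD (i - 1) ' ' = '\\')

lemma glue (t : List Char) (seg i : Nat) (h : seg ≤ i) :
    (t.drop seg).take (i - seg) ++ t.drop i = t.drop seg := by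
  conv_rhs => rw [← List.take_append_drop (i - seg) (t.drop seg)]
  rw [List.drop_drop]
  congr 2
  omega

lemma take_chain (t : List Char) (seg i k : Nat) (h : seg ≤ i) :
    (t.drop seg).take (i - seg) ++ (t.drop i).take k = (t.drop seg).take (i - seg + k) := by
  rw [List.take_add]
  congr 2
  rw [List.drop_drop]
  congr 1
  omega

lemma findStar (l : List Char) (h : ¬ PySem.Chars.find l "**".toList = -1) :
    (PySem.Chars.find l "**".toList).toNat + 2 ≤ l.length ∧
    l[(PySem.Chars.find l "**".toList).toNat]? = some '*' ∧
    l[(PySem.Chars.find l "**".toList).toNat + 1]? = some '*' := by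
  have hinf : "**".toList <:+: l := (PySem.Chars.find_ne_neg_one_iff l "**".toList).mp h
  have h0 : 0 ≤ PySem.Chars.find l "**".toList :=
    (PySem.Chars.find_nonneg_iff l "**".toList).mpr hinf
  obtain ⟨hpre, -⟩ := PySem.Chars.find_spec (s := l) (sub := "**".toList) h0
  set m := (PySem.Chars.find l "**".toList).toNat with hm
  obtain ⟨tail, htail⟩ := hpre
  have hss : ("**".toList : List Char) = ['*', '*'] := by decide
  rw [hss] at htail
  have hlen : (l.drop m).length = l.length - m := List.length_drop ..
  rw [← htail] at hlen
  simp at hlen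
  have hml : m ≤ l.length := by
    by_contra hc
    rw [List.drop_eq_nil_of_le (by omega)] at htail
    simp at htail
  refine ⟨by omega, ?_, ?_⟩
  · have : (l.drop m)[0]? = some '*' := by rw [← htail]; rfl
    rwa [List.getElem?_drop, Nat.add_zero] at this
  · have : (l.drop m)[1]? = some '*' := by rw [← htail]; rfl
    rwa [List.getElem?_drop] at this

lemma scanA_nil (pe dc : Bool) : scanA [] pe dc = 0 := rfl

lemma convA'_nil (pe dc : Bool) : convA' [] pe dc = [] := by
  unfold convA'
  simp [scanA_nil]

-- one non-break scan step peels one char off the front of convA'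
lemma consStep (c : Char) (rest : List Char) (pe pe' d d' : Bool)
    (hscan : scanA (c :: rest) pe d = scanA rest pe' d' + 1) :
    convA' (c :: rest) pe d = c :: convA' rest pe' d' := by
  unfold convA'
  rw [hscan]
  set j := scanA rest pe' d' with hj
  simp only [List.length_cons, ge_iff_le,
    show j + 1 + 2 = j + 2 + 1 from by omega,
    show ∀ e0 : Nat, j + 1 + 2 + e0 + 2 = j + 2 + e0 + 2 + 1 from fun _ => by omega,
    List.drop_succ_cons, List.take_succ_cons]
  by_cases hge : rest.length ≤ j
  · rw [if_pos (by omega), if_pos hge]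
  · rw [if_neg (by omega), if_neg hge]
    split
    · simp
    · simp

lemma stepShift (t : List Char) (i seg : Nat) (pe pe' d d' : Bool)
    (hsi : seg ≤ i) (hil : i < t.length)
    (hscan : scanA (t.drop i) pe d = scanA (t.drop (i + 1)) pe' d' + 1) :
    (t.drop seg).take (i - seg) ++ convA' (t.drop i) pe d
      = (t.drop seg).take (i + 1 - seg) ++ convA' (t.drop (i + 1)) pe' d' := by
  have hcons : t.drop i = t[i] :: t.drop (i + 1) := List.drop_eq_getElem_cons hil
  rw [hcons] at hscan ⊢
  rw [consStep _ _ _ _ _ _ hscan]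
  have htake : (t.drop seg).take (i + 1 - seg)
      = (t.drop seg).take (i - seg) ++ [t[i]] := by
    have h1 : (t.drop i).take 1 = [t[i]] := by rw [hcons]; rfl
    have := take_chain t seg i 1 hsi
    rw [h1] at this
    rw [show i + 1 - seg = i - seg + 1 from by omega, ← this]
  rw [htake]
  simp

lemma getD_at (t : List Char) (i : Nat) (hi : i < t.length) : t.getD i ' ' = t[i] := by
  rw [List.getD_eq_getElem?_getD, List.getElem?_eq_getElem hi]; rfl

lemma peB_false_iff (t : List Char) (i : Nat) :
    peB t i = false ↔ (i = 0 ∨ ¬ t.getD (i - 1) ' ' = '\\') := by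
  simp [peB]; tauto

lemma peB_succ (t : List Char) (i : Nat) :
    peB t (i + 1) = decide (t.getD i ' ' = '\\') := by
  simp [peB]

lemma head?_iff (t : List Char) (i : Nat) :
    (t.drop (i + 1)).head? = some '*' ↔ (i + 1 < t.length ∧ t.getD (i + 1) ' ' = '*') := by
  rw [List.head?_drop, List.getElem?_eq_some_iff]
  constructor
  · rintro ⟨h, hv⟩; exact ⟨h, by rw [getD_at t (i+1) h, hv]⟩
  · rintro ⟨h, hv⟩; exact ⟨h, by rw [← getD_at t (i+1) h, hv]⟩

lemma scanA_drop_toggle (t : List Char) (i : Nat) (d : Bool) (hi : i < t.length)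
    (hc : t.getD i ' ' = '$') (hpe : peB t i = false) :
    scanA (t.drop i) (peB t i) d = scanA (t.drop (i + 1)) (peB t (i + 1)) (!d) + 1 := by
  rw [List.drop_eq_getElem_cons hi, scanA, if_pos ⟨by rw [← getD_at t i hi, hc], hpe⟩,
    peB_succ, getD_at t i hi]

lemma scanA_drop_break (t : List Char) (i : Nat) (hi : i < t.length)
    (hc : t.getD i ' ' = '*') (h2 : i + 1 < t.length) (hc2 : t.getD (i + 1) ' ' = '*') :
    scanA (t.drop i) (peB t i) false = 0 := by
  rw [List.drop_eq_getElem_cons hi, scanA,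
    if_neg (by rw [← getD_at t i hi, hc]; simp),
    if_pos ⟨rfl, by rw [← getD_at t i hi, hc], (head?_iff t i).mpr ⟨h2, hc2⟩⟩]

lemma scanA_drop_step (t : List Char) (i : Nat) (d : Bool) (hi : i < t.length)
    (hn1 : ¬ (t.getD i ' ' = '$' ∧ peB t i = false))
    (hn2 : ¬ (d = false ∧ t.getD i ' ' = '*' ∧ (t.drop (i + 1)).head? = some '*')) :
    scanA (t.drop i) (peB t i) d = scanA (t.drop (i + 1)) (peB t (i + 1)) d + 1 := by
  rw [List.drop_eq_getElem_cons hi, scanA,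
    if_neg (by rw [← getD_at t i hi]; exact hn1),
    if_neg (by rw [← getD_at t i hi]; exact hn2),
    peB_succ, getD_at t i hi]

lemma convA'_break (t : List Char) (i : Nat) (pe d : Bool) (hi : i < t.length)
    (hscan0 : scanA (t.drop i) pe d = 0) :
    convA' (t.drop i) pe d =
      if PySem.Chars.find (t.drop (i + 2)) "**".toList = -1 then t.drop i
      else "\\textbf{".toList
             ++ (t.drop (i + 2)).take (PySem.Chars.find (t.drop (i + 2)) "**".toList).toNat ++ ['}']
             ++ convA (t.drop (i + 2 + (PySem.Chars.find (t.drop (i + 2)) "**".toList).toNat + 2)) := by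
  unfold convA'
  rw [hscan0]
  simp only [Nat.zero_add, List.take_zero, List.nil_append,
    List.drop_drop, List.length_drop]
  rw [if_neg (by omega)]
  refine if_congr Iff.rfl rfl ?_
  congr 3
  omega

lemma main_inv (k : Nat) : ∀ (t : List Char) (i seg : Nat) (dollar : Bool) (acc : List Char),
    t.length - i ≤ k → seg ≤ i → i ≤ t.length →
    convB t i seg dollar acc
      = acc ++ ((t.drop seg).take (i - seg) ++ convA' (t.drop i) (peB t i) dollar) := by
  induction k with
  | zero =>
    intro t i seg dollar acc hk hsi hil
    have hi : i = t.length := by omega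
    rw [convB, dif_neg (by omega)]
    subst hi
    rw [List.drop_length, convA'_nil]
    have h1 : (t.drop seg).take (t.length - seg) = t.drop seg :=
      List.take_of_length_le (by simp)
    simp [h1]
  | succ k ih =>
    intro t i seg dollar acc hk hsi hil
    by_cases hi : i < t.length
    · rw [convB, dif_pos hi]
      split_ifs with h1 h2 h3
      · -- dollar toggle step
        rw [ih t (i + 1) seg (!dollar) acc (by omega) (by omega) (by omega)]
        congr 1
        exact (stepShift t i seg _ _ _ _ hsi hi
          (scanA_drop_toggle t i dollar hi h1.1 ((peB_false_iff t i).mpr h1.2))).symm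
      · -- found opening **, no closing ** : emit the tail
        have hscan0 : scanA (t.drop i) (peB t i) dollar = 0 := by
          rw [h2.1]; exact scanA_drop_break t i hi h2.2.1 h2.2.2.1 h2.2.2.2
        rw [convA'_break t i _ dollar hi hscan0, if_pos h3, glue t seg i hsi]
      · -- found opening ** and closing ** : emit \textbf{...} and continue after it
        have hscan0 : scanA (t.drop i) (peB t i) dollar = 0 := by
          rw [h2.1]; exact scanA_drop_break t i hi h2.2.1 h2.2.2.1 h2.2.2.2
        obtain ⟨hlen2, hstar0, hstar1⟩ := findStar (t.drop (i + 2)) h3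
        rw [List.getElem?_drop] at hstar1
        have hE : i + 2 + (PySem.Chars.find (t.drop (i + 2)) "**".toList).toNat + 2 ≤ t.length := by
          simp only [List.length_drop] at hlen2; omega
        have hpeE : peB t (i + 2 + (PySem.Chars.find (t.drop (i + 2)) "**".toList).toNat + 2) = false := by
          simp only [peB, decide_eq_false_iff_not, not_and]
          intro _
          rw [List.getD_eq_getElem?_getD,
            show i + 2 + (PySem.Chars.find (t.drop (i + 2)) "**".toList).toNat + 2 - 1
               = i + 2 + ((PySem.Chars.find (t.drop (i + 2)) "**".toList).toNat + 1) from by omega,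
            hstar1]
          simp
        rw [ih t _ _ false _ (by omega) (by omega) hE, hpeE, ← convA_eq,
          convA'_break t i _ dollar hi hscan0, if_neg h3]
        simp [List.append_assoc]
      · -- ordinary character: advance the cursor
        rw [ih t (i + 1) seg dollar acc (by omega) (by omega) (by omega)]
        congr 1
        refine (stepShift t i seg _ _ _ _ hsi hi (scanA_drop_step t i dollar hi ?_ ?_)).symm
        · rw [peB_false_iff]; exact h1
        · rw [head?_iff]
          intro ⟨hd, hs, hrest⟩
          exact h2 ⟨hd, hs, hrest⟩
    · rw [convB, dif_neg hi]
      have hieq : i = t.length := by omega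
      subst hieq
      rw [List.drop_length, convA'_nil]
      have hx : (t.drop seg).take (t.length - seg) = t.drop seg :=
        List.take_of_length_le (by simp)
      simp [hx]

-- ===== VERDICT (by name: the statement is the Claim_ definition above) =====
theorem convert_inline_bold_py_spec : Claim_equal_convert_inline_bold_py := by
  intro text _
  unfold Spec_convert_inline_bold_py convert_inline_bold_py convert_inline_bold_py_alt
  have h := main_inv (text.toList.length) text.toList 0 0 false []
    (by omega) (by omega) (by omega)
  rw [h]
  have hpe : peB text.toList 0 = false := by simp [peB]
  rw [hpe, ← convA_eq]
  simp
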